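-- pv_equiv track=rewrite | github.com/jschoen42/Youtube-download-helper | src/helper/youtube.py | valid_filename_utf16
-- ===== SOURCE A (Python) =====
-- def valid_filename_utf16( text: str ) -> str:
--
--     convert = {
--         "<":  "\uff1c", # "＜" -> Fullwidth Less-Than Sign    - alternative: "\u02c2" -> "˂" -> Modifier Letter Left Arrowhead
--         ">":  "\uff1e", # "＞" -> Fullwidth Greater-Than Sign - alternative: "\u02c3" -> "˃" -> Modifier Letter Right Arrowhead
--         ":":  "\uff1a", # "：" -> Fullwidth Colon
--         "/":  "\uff0f", # "／" -> Fullwidth Solidus           - alternative: "\u2215" -> "∕" -> Division Slash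
--         "|":  "\uff5c", # "｜" -> Fullwidth Vertical Line
--         "?":  "\uff1f", # "？" -> Fullwidth Question Mark
--         "*":  "\uff0a", # "＊" -> Fullwidth Asterisk          - alternative: "\u204e" -> "⁎" -> Low Asterisk
--         "\\": "\uff3c", # "＼" -> Low Line
--         '"':  "\u0027", # "'" -> Apostrophe                   - alternative: "\u2233" -> "″" -> Double Prime
--     }
--
--     for x, y in convert.items():
--         text = text.replace(x, y)
--
--     return text
-- ===== SOURCE B (Python) =====
-- def valid_filename_utf16(text: str) -> str:
--     # Single run-slicing pass: copy maximal runs of safe characters unchanged;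
--     # each forbidden character becomes its fullwidth form via the ordinal offset
--     # 0xFEE0 (ASCII -> Fullwidth block), except '"' which becomes an apostrophe.
--     pieces = []
--     start = 0
--     for j, c in enumerate(text):
--         if c in '<>:/|?*\\"':
--             pieces.append(text[start:j])
--             pieces.append("'" if c == '"' else chr(ord(c) + 0xFEE0))
--             start = j + 1
--     pieces.append(text[start:])
--     return ''.join(pieces)
-- ===== Notes on version B (the rewrite author's own statement) =====
-- stated objective: alternative
-- what changed: A rescans the whole string nine times with sequential str.replace calls keyed by an explicit dict; B makes one run-slicing pass that copies maximal runs of safe characters as slices and computes each replacement arithmetically (chr(ord(c)+0xFEE0) into the Fullwidth block, apostrophe for the double quote) instead of looking it up, joining the pieces at the end.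
import Mathlib
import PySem

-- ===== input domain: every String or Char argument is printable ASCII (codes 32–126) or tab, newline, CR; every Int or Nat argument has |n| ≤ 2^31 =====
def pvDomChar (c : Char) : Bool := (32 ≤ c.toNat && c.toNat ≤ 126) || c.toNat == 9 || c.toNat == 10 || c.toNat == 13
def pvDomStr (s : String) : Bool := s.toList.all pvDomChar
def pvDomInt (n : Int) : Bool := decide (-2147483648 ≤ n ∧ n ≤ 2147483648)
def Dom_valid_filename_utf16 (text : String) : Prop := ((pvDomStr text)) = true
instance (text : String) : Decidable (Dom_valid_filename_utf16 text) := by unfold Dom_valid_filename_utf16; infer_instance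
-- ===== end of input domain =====

-- B replaces A's nine sequential str.replace rescans with one run-slicing pass:
-- safe runs are copied as slices, each bad char is mapped arithmetically (+0xFEE0;
-- apostrophe for '"') and the pieces are joined once; alternative, not measured faster.

-- ===== PORT A =====
-- the dict of A, as an association list in insertion order
def pvConvert : List (String × String) :=
  [("<", "\uff1c"), (">", "\uff1e"), (":", "\uff1a"), ("/", "\uff0f"),
   ("|", "\uff5c"), ("?", "\uff1f"), ("*", "\uff0a"), ("\\", "\uff3c"), ("\"", "\u0027")]

def valid_filename_utf16 (text : String) : String :=
  pvConvert.foldl (fun t p => PySem.Str.replace t p.1 p.2) text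

-- ===== PORT B =====
-- the forbidden characters (the string literal of Source B's membership test)
def pvBad : List Char := "<>:/|?*\\\"".toList

-- "'" if c == '"' else chr(ord(c) + 0xFEE0)
def pvRepl (c : Char) : Char := if c = '"' then '\'' else Char.ofNat (c.toNat + 0xFEE0)

-- the loop body of Source B: state (start, pieces), element (j, c)
def pvStep (cs : List Char) (st : Int × List (List Char)) (p : Int × Char) :
    Int × List (List Char) :=
  if pvBad.contains p.2 then
    (p.1 + 1, st.2 ++ [PySem.List.slice cs (some st.1) (some p.1), [pvRepl p.2]])
  else st

-- one pass over enumerate(text); final tail slice; ''.join of the pieces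
def valid_filename_utf16_alt (text : String) : String :=
  let cs := text.toList
  let st := (PySem.List.enumerate cs 0).foldl (pvStep cs) ((0 : Int), ([] : List (List Char)))
  String.ofList ((st.2 ++ [PySem.List.slice cs (some st.1) none]).flatten)

-- ===== PRECONDITION & SPEC =====
def Spec_valid_filename_utf16 (text : String) (out : String) : Prop := out = valid_filename_utf16_alt text
instance (text : String) (out : String) : Decidable (Spec_valid_filename_utf16 text out) := by unfold Spec_valid_filename_utf16; infer_instance

-- ===== CLAIM =====
def Claim_equal_valid_filename_utf16 : Prop := ∀ (text : String), Dom_valid_filename_utf16 text → Spec_valid_filename_utf16 text (valid_filename_utf16 text)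

-- ===== LEMMAS AND PROOFS =====

-- one-character substitution
def pvSubst (k v c : Char) : Char := if c = k then v else c

theorem replace_go_single (o n : Char) : ∀ (fuel : Nat) (l acc : List Char),
    l.length ≤ fuel →
    PySem.Chars.replace.go [o] [n] fuel l acc = acc.reverse ++ l.map (pvSubst o n) := by
  intro fuel
  induction fuel with
  | zero =>
    intro l acc h
    have : l = [] := List.eq_nil_of_length_eq_zero (Nat.le_zero.mp h)
    subst this
    simp [PySem.Chars.replace.go]
  | succ f ih =>
    intro l acc h
    cases l with
    | nil => simp [PySem.Chars.replace.go]
    | cons c t =>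
      by_cases hc : c = o
      · subst hc
        have hp : List.isPrefixOf [c] (c :: t) = true := by
          simp [List.isPrefixOf]
        simp only [PySem.Chars.replace.go, hp, if_pos]
        rw [ih]
        · simp [pvSubst]
        · simpa using Nat.le_of_succ_le_succ h
      · have hp : List.isPrefixOf [o] (c :: t) = false := by
          simp only [List.isPrefixOf, Bool.and_true, beq_eq_false_iff_ne, ne_eq]
          exact fun h => hc h.symm
        simp only [PySem.Chars.replace.go, hp, Bool.false_eq_true, if_false]
        rw [ih]
        · simp [pvSubst, hc]
        · simpa using Nat.le_of_succ_le_succ h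

theorem replace_single (o n : Char) (l : List Char) :
    PySem.Chars.replace l [o] [n] = l.map (pvSubst o n) := by
  simp only [PySem.Chars.replace, List.isEmpty_cons, Bool.false_eq_true, if_false]
  simpa using replace_go_single o n l.length l [] le_rfl

theorem toList_replace_single (s : String) (o n : Char) :
    (PySem.Str.replace s (String.ofList [o]) (String.ofList [n])).toList = s.toList.map (pvSubst o n) := by
  rw [PySem.Str.toList_replace, String.toList_ofList, String.toList_ofList, replace_single]

-- the composite of the nine substitutions, in A's order
def pvChain (c : Char) : Char :=
  pvSubst '"' '\u0027' (pvSubst '\\' '\uff3c' (pvSubst '*' '\uff0a' (pvSubst '?' '\uff1f'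
    (pvSubst '|' '\uff5c' (pvSubst '/' '\uff0f' (pvSubst ':' '\uff1a'
      (pvSubst '>' '\uff1e' (pvSubst '<' '\uff1c' c))))))))

-- B's per-character effect: replace if forbidden, keep otherwise
def pvTransB (c : Char) : Char := if pvBad.contains c then pvRepl c else c

theorem chain_eq_transB (c : Char) : pvChain c = pvTransB c := by
  by_cases h1 : c = '<'; · subst h1; decide
  by_cases h2 : c = '>'; · subst h2; decide
  by_cases h3 : c = ':'; · subst h3; decide
  by_cases h4 : c = '/'; · subst h4; decide
  by_cases h5 : c = '|'; · subst h5; decide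
  by_cases h6 : c = '?'; · subst h6; decide
  by_cases h7 : c = '*'; · subst h7; decide
  by_cases h8 : c = '\\'; · subst h8; decide
  by_cases h9 : c = '"'; · subst h9; decide
  have hb : pvBad.contains c = false := by
    simp only [pvBad]
    simp [List.contains_eq_mem, h1, h2, h3, h4, h5, h6, h7, h8, h9]
  unfold pvTransB
  rw [hb]
  simp [pvChain, pvSubst, h1, h2, h3, h4, h5, h6, h7, h8, h9]

set_option maxHeartbeats 1000000 in
theorem toList_A (text : String) :
    (valid_filename_utf16 text).toList = text.toList.map pvChain := by
  show (PySem.Str.replace (PySem.Str.replace (PySem.Str.replace (PySem.Str.replace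
        (PySem.Str.replace (PySem.Str.replace (PySem.Str.replace (PySem.Str.replace
        (PySem.Str.replace text "<" "\uff1c") ">" "\uff1e") ":" "\uff1a") "/" "\uff0f")
        "|" "\uff5c") "?" "\uff1f") "*" "\uff0a") "\\" "\uff3c") "\"" "\u0027").toList
      = text.toList.map pvChain
  rw [show ("\"" : String) = String.ofList ['"'] from rfl,
      show ("\u0027" : String) = String.ofList ['\u0027'] from rfl,
      toList_replace_single,
      show ("\\" : String) = String.ofList ['\\'] from rfl,
      show ("\uff3c" : String) = String.ofList ['\uff3c'] from rfl,
      toList_replace_single,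
      show ("*" : String) = String.ofList ['*'] from rfl,
      show ("\uff0a" : String) = String.ofList ['\uff0a'] from rfl,
      toList_replace_single,
      show ("?" : String) = String.ofList ['?'] from rfl,
      show ("\uff1f" : String) = String.ofList ['\uff1f'] from rfl,
      toList_replace_single,
      show ("|" : String) = String.ofList ['|'] from rfl,
      show ("\uff5c" : String) = String.ofList ['\uff5c'] from rfl,
      toList_replace_single,
      show ("/" : String) = String.ofList ['/'] from rfl,
      show ("\uff0f" : String) = String.ofList ['\uff0f'] from rfl,
      toList_replace_single,
      show (":" : String) = String.ofList [':'] from rfl,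
      show ("\uff1a" : String) = String.ofList ['\uff1a'] from rfl,
      toList_replace_single,
      show (">" : String) = String.ofList ['>'] from rfl,
      show ("\uff1e" : String) = String.ofList ['\uff1e'] from rfl,
      toList_replace_single,
      show ("<" : String) = String.ofList ['<'] from rfl,
      show ("\uff1c" : String) = String.ofList ['\uff1c'] from rfl,
      toList_replace_single]
  simp [List.map_map, pvChain, Function.comp]

-- a map that fixes every element of a list is the identity on it
theorem map_eq_self_of (l : List Char) (f : Char → Char) (h : ∀ x ∈ l, f x = x) :
    l.map f = l := by
  induction l with
  | nil => rfl
  | cons a t ih =>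
    simp only [List.map_cons, h a (by simp)]
    rw [ih (fun x hx => h x (by simp [hx]))]

-- loop invariant for B's single pass: processing the suffix starting at n with
-- current run start i (all of cs[i:n] safe) yields exactly map pvTransB of cs[i:]
theorem fold_inv (cs : List Char) : ∀ (l : List Char) (n i : Nat) (out : List (List Char)),
    cs.drop n = l → i ≤ n → n ≤ cs.length →
    (∀ c ∈ (cs.drop i).take (n - i), pvBad.contains c = false) →
    ((((PySem.List.enumerate l (n : Int)).foldl (pvStep cs) ((i : Int), out)).2
        ++ [PySem.List.slice cs
              (some ((PySem.List.enumerate l (n : Int)).foldl (pvStep cs) ((i : Int), out)).1)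
              none]).flatten
      = out.flatten ++ (cs.drop i).map pvTransB) := by
  intro l
  induction l with
  | nil =>
    intro n i out hdrop hin hn hsafe
    have hlen : cs.length ≤ n := by
      have := congrArg List.length hdrop
      simp at this; omega
    have hnl : n = cs.length := le_antisymm hn hlen
    have htake : (cs.drop i).take (n - i) = cs.drop i := by
      apply List.take_of_length_le
      simp; omega
    rw [htake] at hsafe
    have hmap : (cs.drop i).map pvTransB = cs.drop i := by
      apply map_eq_self_of
      intro c hc
      simp only [pvTransB, hsafe c hc, Bool.false_eq_true, if_false]
    simp only [PySem.List.enumerate_nil, List.foldl_nil]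
    rw [PySem.List.slice_from_natCast, hmap]
    simp
  | cons c l' ih =>
    intro n i out hdrop hin hn hsafe
    have hnlt : n < cs.length := by
      have := congrArg List.length hdrop
      simp at this; omega
    have hdrop' : cs.drop (n + 1) = l' := by
      have : (cs.drop n).tail = l' := by rw [hdrop]; rfl
      rw [← this, List.tail_drop]
    -- decompose cs.drop i
    have hsplit : cs.drop i = (cs.drop i).take (n - i) ++ c :: l' := by
      conv_lhs => rw [← List.take_append_drop (n - i) (cs.drop i)]
      rw [List.drop_drop]
      have heq : i + (n - i) = n := by omega
      rw [heq, hdrop]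
    have hlentake : ((cs.drop i).take (n - i)).length = n - i := by
      rw [List.length_take]; simp; omega
    rw [PySem.List.enumerate_cons, List.foldl_cons]
    have hcast : (n : Int) + 1 = ((n + 1 : Nat) : Int) := by push_cast; ring
    by_cases hb : pvBad.contains c = true
    · -- bad character: flush the run and the replacement, restart at n+1
      have hstep : pvStep cs ((i : Int), out) ((n : Int), c)
          = ((n : Int) + 1,
             out ++ [PySem.List.slice cs (some (i : Int)) (some (n : Int)), [pvRepl c]]) := by
        simp only [pvStep]
        rw [hb]
        simp
      rw [hstep, hcast, ih (n + 1) (n + 1) _ hdrop' le_rfl hnlt (by simp)]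
      rw [hdrop', hsplit]
      rw [PySem.List.slice_natCast]
      simp only [List.map_append, List.map_cons, List.flatten_append, List.flatten_cons]
      have hmaptake : ((cs.drop i).take (n - i)).map pvTransB = (cs.drop i).take (n - i) := by
        apply map_eq_self_of
        intro x hx
        simp only [pvTransB, hsafe x hx, Bool.false_eq_true, if_false]
      rw [hmaptake]
      have hc : pvTransB c = pvRepl c := by simp only [pvTransB, hb, if_true]
      rw [hc]
      simp
    · -- safe character: state unchanged, the run grows
      have hb' : pvBad.contains c = false := by simpa using hb
      have hstep : pvStep cs ((i : Int), out) ((n : Int), c) = ((i : Int), out) := by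
        simp only [pvStep]
        rw [hb']
        simp
      rw [hstep, hcast, ih (n + 1) i out hdrop' (by omega) hnlt ?_]
      intro x hx
      have htake' : (cs.drop i).take (n + 1 - i) = (cs.drop i).take (n - i) ++ [c] := by
        conv_lhs => rw [hsplit]
        rw [List.take_append]
        have h1 : n + 1 - i - ((cs.drop i).take (n - i)).length = 1 := by
          rw [hlentake]; omega
        rw [h1]
        have h2 : (cs.drop i).take (n - i) = ((cs.drop i).take (n - i)).take (n + 1 - i) := by
          rw [List.take_take]
          congr 1; omega
        rw [← h2]
        rfl
      rw [htake'] at hx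
      rcases List.mem_append.mp hx with h | h
      · exact hsafe x h
      · simp at h; subst h; exact hb'

theorem toList_B (text : String) :
    (valid_filename_utf16_alt text).toList = text.toList.map pvTransB := by
  unfold valid_filename_utf16_alt
  rw [String.toList_ofList]
  have := fold_inv text.toList text.toList 0 0 [] (by simp) le_rfl (by simp) (by simp)
  simpa using this

-- ===== VERDICT =====
theorem valid_filename_utf16_spec : Claim_equal_valid_filename_utf16 := by
  intro text _
  unfold Spec_valid_filename_utf16
  have hA : (valid_filename_utf16 text).toList = text.toList.map pvTransB :=
    (toList_A text).trans (List.map_congr_left fun c _ => chain_eq_transB c)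
  have hB := toList_B text
  have : (valid_filename_utf16 text).toList = (valid_filename_utf16_alt text).toList :=
    hA.trans hB.symm
  calc valid_filename_utf16 text = String.ofList (valid_filename_utf16 text).toList :=
        String.ofList_toList.symm
    _ = String.ofList (valid_filename_utf16_alt text).toList := by rw [this]
    _ = valid_filename_utf16_alt text := String.ofList_toList
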